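-- pv_equiv track=rewrite | github.com/BigBrain3D/Swapper3dOctoprintPlugin | Swapper3D_Package/Swapper3D_utils.py | parity_of
-- ===== SOURCE A (Python) =====
-- def parity_of(input_string):
--     """
--     Function to calculate parity bit for a given string.
--
--     :param input_string: String value to calculate parity for
--     :return: Parity bit (0 or 1)
--     """
--     count = 0
--     for ch in input_string:
--         value = ord(ch)
--         while value:
--             count += 1
--             value = value & (value - 1)
--     return ~count & 1  # returns 1 for odd parity, 0 for even parity
-- ===== SOURCE B (Python) =====
-- def parity_of(input_string):
--     """XOR-accumulation: fold per-character popcount parity with a SWAR xor-fold."""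
--     acc = 0
--     for ch in input_string:
--         x = ord(ch)
--         x ^= x >> 16
--         x ^= x >> 8
--         x ^= x >> 4
--         x ^= x >> 2
--         x ^= x >> 1
--         acc ^= x & 1
--     return acc ^ 1
-- ===== Notes on version B (the rewrite author's own statement) =====
-- stated objective: alternative
-- what changed: Replaces A's Kernighan value&=(value-1) bit-clearing inner loop and final ~count&1 by an XOR accumulator that folds in each character's popcount parity via a constant 5-step SWAR xor-fold, returning acc^1.
import Mathlib
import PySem

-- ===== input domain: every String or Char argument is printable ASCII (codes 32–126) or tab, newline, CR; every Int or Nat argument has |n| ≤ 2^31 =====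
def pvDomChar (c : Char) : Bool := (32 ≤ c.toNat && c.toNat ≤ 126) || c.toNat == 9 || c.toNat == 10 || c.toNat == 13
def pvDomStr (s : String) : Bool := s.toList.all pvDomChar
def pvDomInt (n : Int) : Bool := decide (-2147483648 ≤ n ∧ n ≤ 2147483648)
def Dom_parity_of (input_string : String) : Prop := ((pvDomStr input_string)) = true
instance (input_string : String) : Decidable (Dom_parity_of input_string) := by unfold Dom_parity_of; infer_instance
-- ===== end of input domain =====

-- B replaces A's Kernighan bit-clearing loop and final `~count & 1` by an XOR accumulator
-- with a constant SWAR xor-fold per character (objective: alternative, same cost).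

-- ===== PORT A =====
-- the `while value:` loop: value strictly decreases (value &&& (value-1) < value), so a
-- fuel of `value` iterations is always enough; the fuel is only a totality device.
def kernAux : Nat → Nat → Int → Int
  | 0, _, count => count
  | fuel+1, value, count =>
      if value = 0 then count else kernAux fuel (value &&& (value - 1)) (count + 1)

-- Python's `~count & 1` on ints is exactly Int.land (Int.lnot count) 1 (two's complement).
def parity_of (input_string : String) : Int :=
  Int.land
    (Int.lnot (input_string.toList.foldl (fun count ch => kernAux ch.toNat ch.toNat count) 0))
    1

-- ===== PORT B =====
def swar (x : Nat) : Nat :=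
  let x := x ^^^ (x >>> 16)
  let x := x ^^^ (x >>> 8)
  let x := x ^^^ (x >>> 4)
  let x := x ^^^ (x >>> 2)
  let x := x ^^^ (x >>> 1)
  x &&& 1

def parity_of_alt (input_string : String) : Int :=
  (((input_string.toList.foldl (fun acc ch => acc ^^^ swar ch.toNat) 0) ^^^ 1 : Nat) : Int)

-- ===== PRECONDITION & SPEC =====
def Spec_parity_of (input_string : String) (out : Int) : Prop := out = parity_of_alt input_string
instance (input_string : String) (out : Int) : Decidable (Spec_parity_of input_string out) := by unfold Spec_parity_of; infer_instance

-- ===== CLAIM (what is proved, stated in full; the proofs are below) =====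
def Claim_equal_parity_of : Prop := ∀ (input_string : String), Dom_parity_of input_string → Spec_parity_of input_string (parity_of input_string)

-- ===== LEMMAS AND PROOFS =====
theorem ldiff_one (n : Nat) : Nat.ldiff 1 n = 1 - n % 2 := by
  rcases Nat.even_or_odd n with ⟨k,hk⟩|⟨k,hk⟩ <;> subst hk <;>
    simp [Nat.ldiff, Nat.bitwise] <;> split_ifs <;> omega

theorem lnot_land_one (c : Int) : Int.land (Int.lnot c) 1 = 1 - c % 2 := by
  cases c with
  | ofNat n =>
      cases n with
      | zero =>
          show ((Nat.ldiff 1 0 : Nat) : Int) = _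
          rw [ldiff_one]; simp
      | succ m => simp [Int.lnot, Int.land, ldiff_one]; omega
  | negSucc m => simp [Int.lnot, Int.land, Nat.and_one_is_mod]; omega

theorem kernAux_add (f v : Nat) (c : Int) : kernAux f v c = c + kernAux f v 0 := by
  induction f generalizing v c with
  | zero => simp [kernAux]
  | succ f ih =>
      simp only [kernAux]
      split
      · simp
      · rw [ih, ih _ (0+1)]; ring

-- per-character agreement on the finite character domain (code < 128)
theorem char_step (v : Nat) (hv : v < 128) :
    kernAux v v 0 % 2 = ((swar v : Nat) : Int) ∧ swar v ≤ 1 := by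
  interval_cases v <;> exact ⟨by decide, by decide⟩

theorem fold_inv (l : List Char) (c : Int) (a : Nat)
    (hl : ∀ ch ∈ l, ch.toNat < 128) (hc : c % 2 = (a : Int)) (ha : a ≤ 1) :
    (l.foldl (fun count ch => kernAux ch.toNat ch.toNat count) c) % 2
      = ((l.foldl (fun acc ch => acc ^^^ swar ch.toNat) a : Nat) : Int)
    ∧ (l.foldl (fun acc ch => acc ^^^ swar ch.toNat) a) ≤ 1 := by
  induction l generalizing c a with
  | nil => exact ⟨hc, ha⟩
  | cons ch t ih =>
      have hch := hl ch (by simp)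
      obtain ⟨hk, hs⟩ := char_step ch.toNat hch
      simp only [List.foldl_cons]
      apply ih
      · intro x hx; exact hl x (by simp [hx])
      · rw [kernAux_add, Int.add_emod, hk, hc]
        interval_cases a <;> interval_cases h : swar ch.toNat <;> simp_all
      · interval_cases a <;> interval_cases h : swar ch.toNat <;> simp

-- ===== VERDICT (by name: the statement is the Claim_ definition above) =====
theorem parity_of_spec : Claim_equal_parity_of := by
  intro s hdom
  unfold Spec_parity_of parity_of parity_of_alt
  have hl : ∀ ch ∈ s.toList, ch.toNat < 128 := by
    intro ch hch
    have := List.all_eq_true.mp hdom ch hch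
    simp [pvDomChar] at this
    omega
  obtain ⟨h1, h2⟩ := fold_inv s.toList 0 0 hl (by decide) (by decide)
  rw [lnot_land_one, h1]
  interval_cases h : (s.toList.foldl (fun acc ch => acc ^^^ swar ch.toNat) 0) <;> simp
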